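-- pv_equiv track=rewrite | github.com/mrg33k/pipeline | dashboard_ui.py | _match_query
-- ===== SOURCE A (Python) =====
-- def _match_query(item: dict, q: str) -> bool:
--     if not q:
--         return True
--     blob = " ".join(
--         str(item.get(key, ""))
--         for key in ("name", "email", "company", "title", "industry", "subject", "snippet", "to_email", "to_raw")
--     ).lower()
--     return all(token in blob for token in q.lower().split())
-- ===== SOURCE B (Python) =====
-- def _match_query(item: dict, q: str) -> bool:
--     if not q:
--         return True
--     keys = ("name", "email", "company", "title", "industry", "subject", "snippet", "to_email", "to_raw")
--     return all(
--         any(token in str(item.get(key, "")).lower() for key in keys)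
--         for token in q.lower().split()
--     )
-- ===== Notes on version B (the rewrite author's own statement) =====
-- stated objective: alternative
-- what changed: Instead of concatenating all fields into one lowered blob and scanning it per token, B inverts the decomposition: each token must occur in at least one individually lowered field; no joined blob is ever built (equal because whitespace-free tokens cannot match across the ' ' join boundary).
import Mathlib
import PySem

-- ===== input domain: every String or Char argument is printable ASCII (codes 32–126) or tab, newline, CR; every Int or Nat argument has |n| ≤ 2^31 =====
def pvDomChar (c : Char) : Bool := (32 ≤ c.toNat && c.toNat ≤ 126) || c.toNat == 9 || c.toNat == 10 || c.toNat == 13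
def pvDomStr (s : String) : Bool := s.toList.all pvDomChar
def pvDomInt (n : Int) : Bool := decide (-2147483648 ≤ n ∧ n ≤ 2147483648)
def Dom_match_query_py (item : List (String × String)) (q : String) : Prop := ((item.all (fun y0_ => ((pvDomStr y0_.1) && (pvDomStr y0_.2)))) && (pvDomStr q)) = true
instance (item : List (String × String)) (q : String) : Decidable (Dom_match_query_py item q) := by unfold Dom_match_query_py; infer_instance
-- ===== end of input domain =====

-- B checks each query token against each lowered field instead of building one joined lowered blob; same result (alternative decomposition, return value only).


-- the fixed key tuple of the Python source
def pvKeys : List String := ["name", "email", "company", "title", "industry", "subject", "snippet", "to_email", "to_raw"]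

-- ===== PORT A =====
def match_query_py (item : List (String × String)) (q : String) : Bool :=
  if PySem.Str.len q = 0 then true
  else
    let blob := PySem.Str.lower (PySem.Str.join " " (pvKeys.map (fun key => PySem.Dict.getD ⟨item⟩ key "")))
    (PySem.Str.split₀ (PySem.Str.lower q)).all (fun token => PySem.Str.isIn token blob)

-- ===== PORT B =====
def match_query_py_alt (item : List (String × String)) (q : String) : Bool :=
  if PySem.Str.len q = 0 then true
  else
    (PySem.Str.split₀ (PySem.Str.lower q)).all (fun token =>
      pvKeys.any (fun key => PySem.Str.isIn token (PySem.Str.lower (PySem.Dict.getD ⟨item⟩ key ""))))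

-- ===== PRECONDITION & SPEC =====
def Spec_match_query_py (item : List (String × String)) (q : String) (out : Bool) : Prop := out = match_query_py_alt item q
instance (item : List (String × String)) (q : String) (out : Bool) : Decidable (Spec_match_query_py item q out) := by unfold Spec_match_query_py; infer_instance

-- ===== CLAIM (what is proved, stated in full; the proofs are below) =====
def Claim_equal_match_query_py : Prop := ∀ (item : List (String × String)) (q : String), Dom_match_query_py item q → Spec_match_query_py item q (match_query_py item q)

-- ===== LEMMAS AND PROOFS =====

-- every token produced by str.split() is nonempty and whitespace-free (invariant of split₀.go)
theorem pv_split₀_go_spec (s : List Char) : ∀ (cur : List Char) (acc : List (List Char)),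
    (∀ c ∈ cur, PySem.Chars.isspace c = false) →
    (∀ a ∈ acc, a ≠ [] ∧ ∀ c ∈ a, PySem.Chars.isspace c = false) →
    ∀ t ∈ PySem.Chars.split₀.go s cur acc, t ≠ [] ∧ ∀ c ∈ t, PySem.Chars.isspace c = false := by
  induction s with
  | nil =>
    intro cur acc hcur hacc t ht
    simp only [PySem.Chars.split₀.go] at ht
    split at ht
    · exact hacc t (by simpa using ht)
    · rename_i hne
      have ht' : t = cur.reverse ∨ t ∈ acc := by
        have := (List.mem_reverse.mp ht); simpa [List.mem_cons] using this
      rcases ht' with h | h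
      · subst h
        refine ⟨by simpa [List.isEmpty_iff] using hne, fun c hc => hcur c (by simpa using hc)⟩
      · exact hacc t h
  | cons c rest ih =>
    intro cur acc hcur hacc t ht
    simp only [PySem.Chars.split₀.go] at ht
    split at ht
    · split at ht
      · exact ih [] acc (by simp) hacc t ht
      · refine ih [] (cur.reverse :: acc) (by simp) ?_ t ht
        intro a ha
        rcases List.mem_cons.mp ha with h | h
        · subst h
          rename_i _ hne
          exact ⟨by simpa [List.isEmpty_iff] using hne, fun d hd => hcur d (by simpa using hd)⟩
        · exact hacc a h
    · rename_i hspace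
      refine ih (c :: cur) acc ?_ hacc t ht
      intro d hd
      rcases List.mem_cons.mp hd with h | h
      · subst h; simpa using hspace
      · exact hcur d h

theorem pv_split₀_spec (s : List Char) : ∀ t ∈ PySem.Chars.split₀ s,
    t ≠ [] ∧ ∀ c ∈ t, PySem.Chars.isspace c = false := by
  intro t ht
  exact pv_split₀_go_spec s [] [] (by simp) (by simp) t ht

-- a needle not containing c is an infix of a ++ c :: b iff it is an infix of a or of b
theorem pv_infix_append_cons_iff (t a b : List Char) (c : Char) (_ht : t ≠ []) (hc : c ∉ t) :
    t <:+: a ++ c :: b ↔ t <:+: a ∨ t <:+: b := by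
  constructor
  · rintro ⟨s1, s2, h⟩
    have hdrop : (a ++ c :: b).drop s1.length = t ++ s2 := by
      rw [← h]; simp
    have hpre : t <+: (a ++ c :: b).drop s1.length := by
      rw [hdrop]; exact List.prefix_append t s2
    by_cases h1 : s1.length + t.length ≤ a.length
    · left
      have hlen : s1.length ≤ a.length := le_trans (Nat.le_add_right _ _) h1
      have h2 : (a ++ c :: b).drop s1.length = a.drop s1.length ++ c :: b := by
        rw [List.drop_append_of_le_length hlen]
      rw [h2] at hpre
      have h3 : t <+: a.drop s1.length := by
        have heq := List.prefix_iff_eq_take.mp hpre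
        rw [List.take_append_of_le_length (by simp; omega)] at heq
        exact List.prefix_iff_eq_take.mpr heq
      exact h3.isInfix.trans (List.drop_suffix _ _).isInfix
    · by_cases h2 : a.length < s1.length
      · right
        have h3 : (a ++ c :: b).drop s1.length = b.drop (s1.length - a.length - 1) := by
          have : s1.length = a.length + (s1.length - a.length - 1 + 1) := by omega
          rw [this, List.drop_length_add_append, List.drop_succ_cons]
          congr 1; omega
        rw [h3] at hpre
        exact hpre.isInfix.trans (List.drop_suffix _ _).isInfix
      · exfalso
        -- s1.length ≤ a.length < s1.length + t.length : position a.length - s1.length in t is c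
        have hk : a.length - s1.length < t.length := by omega
        have hg : t[a.length - s1.length]'hk = (a ++ c :: b)[a.length]'(by simp) := by
          have := hpre.getElem (i := a.length - s1.length) hk
          rw [this, List.getElem_drop]
          congr 1; omega
        have : (a ++ c :: b)[a.length]'(by simp) = c := by
          rw [List.getElem_append_right (by omega)]
          simp
        have hct : c = t[a.length - s1.length]'hk := (hg.trans this).symm
        exact hc (hct ▸ List.getElem_mem hk)
  · rintro (h | h)
    · exact h.trans (List.prefix_append a (c :: b)).isInfix
    · exact h.trans ((List.suffix_cons c b).trans (List.suffix_append a (c :: b))).isInfix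

-- a whitespace-free nonempty needle is in ' '.join(parts) iff it is in some part
theorem pv_infix_join_iff (t : List Char) (ht : t ≠ []) (hc : ' ' ∉ t) :
    ∀ parts : List (List Char), (t <:+: PySem.Chars.join [' '] parts ↔ ∃ p ∈ parts, t <:+: p) := by
  intro parts
  induction parts with
  | nil => simp [PySem.Chars.join_nil, List.infix_nil, ht]
  | cons p rest ih =>
    cases rest with
    | nil => simp [PySem.Chars.join_singleton]
    | cons q r =>
      rw [PySem.Chars.join_cons_cons, List.append_assoc, List.singleton_append]
      rw [pv_infix_append_cons_iff t p _ ' ' ht hc]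
      simp only [List.mem_cons] at *
      constructor
      · rintro (h | h)
        · exact ⟨p, Or.inl rfl, h⟩
        · obtain ⟨x, hx, hxt⟩ := ih.mp h; exact ⟨x, Or.inr hx, hxt⟩
      · rintro ⟨x, (rfl | hx), hxt⟩
        · exact Or.inl hxt
        · exact Or.inr (ih.mpr ⟨x, hx, hxt⟩)

-- lowering commutes with joining on a space separator
theorem pv_lower_join (parts : List (List Char)) :
    PySem.Chars.lower (PySem.Chars.join [' '] parts) = PySem.Chars.join [' '] (parts.map PySem.Chars.lower) := by
  induction parts with
  | nil => simp [PySem.Chars.join_nil, PySem.Chars.lower]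
  | cons p rest ih =>
    cases rest with
    | nil => simp [PySem.Chars.join_singleton]
    | cons q r =>
      simp only [List.map_cons]
      rw [PySem.Chars.join_cons_cons, PySem.Chars.join_cons_cons]
      simp only [PySem.Chars.lower, List.map_append] at *
      rw [ih]
      congr 1

-- List.all is determined by the predicate's values on the members
theorem pv_all_congr (l : List String) (f g : String → Bool) (h : ∀ x ∈ l, f x = g x) :
    l.all f = l.all g := by
  induction l with
  | nil => rfl
  | cons x xs ih => simp only [List.all_cons, h x (by simp), ih (fun y hy => h y (by simp [hy]))]

-- ===== VERDICT (by name: the statement is the Claim_ definition above) =====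
theorem match_query_py_spec : Claim_equal_match_query_py := by
  intro item q _
  unfold Spec_match_query_py match_query_py match_query_py_alt
  split
  · rfl
  · apply pv_all_congr
    intro token htok
    have htokC : token.toList ∈ PySem.Chars.split₀ (PySem.Str.lower q).toList := by
      rw [← PySem.Str.split₀_map_toList]
      exact List.mem_map_of_mem htok
    obtain ⟨hne, hns⟩ := pv_split₀_spec _ _ htokC
    have hsp : ' ' ∉ token.toList := fun h => by have h2 := hns ' ' h; rw [(by decide : PySem.Chars.isspace ' ' = true)] at h2; simp at h2
    apply Bool.eq_iff_iff.mpr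
    have hblob : (PySem.Str.lower (PySem.Str.join " " (pvKeys.map (fun key => PySem.Dict.getD ⟨item⟩ key "")))).toList
        = PySem.Chars.join [' '] (pvKeys.map (fun key => PySem.Chars.lower (PySem.Dict.getD (⟨item⟩ : PySem.Dict String String) key "").toList)) := by
      rw [PySem.Str.toList_lower, PySem.Str.toList_join]
      have hsep : (" " : String).toList = [' '] := rfl
      rw [hsep, pv_lower_join, List.map_map, List.map_map]
      rfl
    rw [PySem.Str.isIn_eq, hblob, PySem.Chars.isIn_iff_infix,
        pv_infix_join_iff token.toList hne hsp]
    simp only [List.any_eq_true, List.mem_map, PySem.Str.isIn_eq, PySem.Str.toList_lower,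
      PySem.Chars.isIn_iff_infix]
    constructor
    · rintro ⟨p, ⟨key, hkey, rfl⟩, hp⟩
      exact ⟨key, hkey, hp⟩
    · rintro ⟨key, hkey, hp⟩
      exact ⟨_, ⟨key, hkey, rfl⟩, hp⟩
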